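-- pv_equiv track=rewrite | github.com/arnavbonigala/ipl-engine | scripts/live_inference_sim.py | _role_rank
-- ===== SOURCE A (Python) =====
-- def _role_rank(role: str, prefer_bowler: bool) -> int:
--     """Lower == better match for the desired impact-sub archetype."""
--     r = (role or "").lower()
--     is_bowler = "bowl" in r and "round" not in r
--     is_bat_ar = ("bat" in r) and ("round" in r)
--     is_bowl_ar = ("bowl" in r) and ("round" in r)
--     is_generic_ar = "allround" in r and not (is_bat_ar or is_bowl_ar)
--     is_batter = (
--         not is_bowler and not is_generic_ar and not is_bat_ar and not is_bowl_ar
--         and any(k in r for k in ("bat", "keeper", "opening", "middle", "top-order"))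
--     )
--     if prefer_bowler:
--         if is_bowler: return 0
--         if is_bowl_ar: return 1
--         if is_generic_ar: return 2
--         if is_bat_ar: return 3
--         if is_batter: return 4
--     else:
--         if is_batter: return 0
--         if is_bat_ar: return 1
--         if is_generic_ar: return 2
--         if is_bowl_ar: return 3
--         if is_bowler: return 4
--     return 5
-- ===== SOURCE B (Python) =====
-- _RANKS = {
--     "bowler": (0, 4),
--     "bowl_ar": (1, 3),
--     "both_ar": (1, 1),
--     "bat_ar": (3, 1),
--     "generic_ar": (2, 2),
--     "batter": (4, 0),
--     "none": (5, 5),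
-- }
--
--
-- def _classify(r: str) -> str:
--     """Map a lowercased role string to one disjoint archetype category."""
--     bowl = "bowl" in r
--     bat = "bat" in r
--     batterish = any(k in r for k in ("bat", "keeper", "opening", "middle", "top-order"))
--     if "round" in r:
--         if bowl and bat:
--             return "both_ar"
--         if bowl:
--             return "bowl_ar"
--         if bat:
--             return "bat_ar"
--         if "allround" in r:
--             return "generic_ar"
--         return "batter" if batterish else "none"
--     if bowl:
--         return "bowler"
--     return "batter" if batterish else "none"
--
--
-- def _role_rank(role: str, prefer_bowler: bool) -> int:
--     """Lower == better match for the desired impact-sub archetype."""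
--     r = (role or "").lower()
--     pair = _RANKS[_classify(r)]
--     return pair[0] if prefer_bowler else pair[1]
-- ===== Notes on version B (the rewrite author's own statement) =====
-- stated objective: alternative
-- what changed: Replaces the five overlapping boolean flags and two mirror if-cascades with a decision tree (branching on 'round' first) that classifies the role into one of seven disjoint categories, then returns the rank from a category->(rank_bowler, rank_batter) lookup table.
import Mathlib
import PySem

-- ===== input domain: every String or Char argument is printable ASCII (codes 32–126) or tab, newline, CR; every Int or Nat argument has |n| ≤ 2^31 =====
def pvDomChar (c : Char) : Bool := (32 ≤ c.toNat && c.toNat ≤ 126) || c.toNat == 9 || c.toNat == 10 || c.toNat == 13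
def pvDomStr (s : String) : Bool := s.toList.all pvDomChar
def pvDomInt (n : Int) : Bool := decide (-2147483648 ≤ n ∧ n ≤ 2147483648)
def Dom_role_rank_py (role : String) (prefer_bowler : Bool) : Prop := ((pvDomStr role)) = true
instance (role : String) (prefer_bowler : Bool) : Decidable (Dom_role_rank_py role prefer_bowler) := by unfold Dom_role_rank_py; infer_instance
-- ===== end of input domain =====

-- B replaces A's overlapping flags and mirror if-cascades with a decision tree into
-- seven disjoint categories plus a category -> (rank, rank) lookup table (objective: alternative).

-- ===== PORT A =====
def role_rank_py (role : String) (prefer_bowler : Bool) : Int :=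
  let r := PySem.Str.lower role
  let is_bowler := PySem.Str.isIn "bowl" r && !(PySem.Str.isIn "round" r)
  let is_bat_ar := PySem.Str.isIn "bat" r && PySem.Str.isIn "round" r
  let is_bowl_ar := PySem.Str.isIn "bowl" r && PySem.Str.isIn "round" r
  let is_generic_ar := PySem.Str.isIn "allround" r && !(is_bat_ar || is_bowl_ar)
  let is_batter :=
    !is_bowler && !is_generic_ar && !is_bat_ar && !is_bowl_ar &&
      (["bat", "keeper", "opening", "middle", "top-order"].any (fun k => PySem.Str.isIn k r))
  if prefer_bowler then
    if is_bowler then 0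
    else if is_bowl_ar then 1
    else if is_generic_ar then 2
    else if is_bat_ar then 3
    else if is_batter then 4
    else 5
  else
    if is_batter then 0
    else if is_bat_ar then 1
    else if is_generic_ar then 2
    else if is_bowl_ar then 3
    else if is_bowler then 4
    else 5

-- ===== PORT B =====
-- _RANKS: dict literal, insertion order preserved
def pvRanks : PySem.Dict String (Int × Int) :=
  PySem.Dict.ofList
    [("bowler", (0, 4)), ("bowl_ar", (1, 3)), ("both_ar", (1, 1)), ("bat_ar", (3, 1)),
     ("generic_ar", (2, 2)), ("batter", (4, 0)), ("none", (5, 5))]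

-- _classify: decision tree into one disjoint category
def pvClassify (r : String) : String :=
  let bowl := PySem.Str.isIn "bowl" r
  let bat := PySem.Str.isIn "bat" r
  let batterish := ["bat", "keeper", "opening", "middle", "top-order"].any (fun k => PySem.Str.isIn k r)
  if PySem.Str.isIn "round" r then
    if bowl && bat then "both_ar"
    else if bowl then "bowl_ar"
    else if bat then "bat_ar"
    else if PySem.Str.isIn "allround" r then "generic_ar"
    else if batterish then "batter" else "none"
  else if bowl then "bowler"
  else if batterish then "batter" else "none"

-- _RANKS[cat] cannot miss (classify always returns a key); getD (5,5) stands for the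
-- unreachable KeyError branch
def role_rank_py_alt (role : String) (prefer_bowler : Bool) : Int :=
  let r := PySem.Str.lower role
  let pair := PySem.Dict.getD pvRanks (pvClassify r) (5, 5)
  if prefer_bowler then pair.1 else pair.2

-- ===== PRECONDITION & SPEC =====
def Spec_role_rank_py (role : String) (prefer_bowler : Bool) (out : Int) : Prop := out = role_rank_py_alt role prefer_bowler
instance (role : String) (prefer_bowler : Bool) (out : Int) : Decidable (Spec_role_rank_py role prefer_bowler out) := by unfold Spec_role_rank_py; infer_instance

-- ===== CLAIM (what is proved, stated in full; the proofs are below) =====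
def Claim_equal_role_rank_py : Prop := ∀ (role : String) (prefer_bowler : Bool), Dom_role_rank_py role prefer_bowler → Spec_role_rank_py role prefer_bowler (role_rank_py role prefer_bowler)

-- ===== LEMMAS AND PROOFS =====

-- "allround" in r implies "round" in r ("round" is an infix of "allround")
theorem isIn_round_of_allround (r : String) :
    PySem.Str.isIn "allround" r = true → PySem.Str.isIn "round" r = true := by
  intro h
  rw [PySem.Str.isIn_iff_infix] at h ⊢
  exact List.IsInfix.trans (by decide) h

-- ===== VERDICT (by name: the statement is the Claim_ definition above) =====
theorem role_rank_py_spec : Claim_equal_role_rank_py := by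
  intro role pb _
  unfold Spec_role_rank_py role_rank_py role_rank_py_alt pvClassify
  cases h4 : PySem.Str.isIn "allround" (PySem.Str.lower role) <;>
  cases h1 : PySem.Str.isIn "bowl" (PySem.Str.lower role) <;>
  cases h2 : PySem.Str.isIn "round" (PySem.Str.lower role) <;>
  cases h3 : PySem.Str.isIn "bat" (PySem.Str.lower role) <;>
  cases hb : (["bat", "keeper", "opening", "middle", "top-order"].any
      (fun k => PySem.Str.isIn k (PySem.Str.lower role))) <;>
  cases pb <;>
  first
  | (simp_all [pvRanks] <;> decide)
  | (have hr := isIn_round_of_allround _ h4; simp_all)
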